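-- pv_equiv track=rewrite | github.com/mattdst1/fullstack_open_gradio_fastapi | src/part2/phonebook/main.py | handle_submit
-- ===== SOURCE A (Python) =====
-- def handle_submit(name_list: list[dict], name: str, number: str):
--     names = [d["name"] for d in name_list]
--     if name not in names:
--         name_object = {"name": name, "number": number}
--         name_list.append(name_object)
--     else:
--         index = names.index(name)
--         name_object = {"name": name, "number": number}
--         name_list[index] = name_object
--     return name_list, "", ""
-- ===== SOURCE B (Python) =====
-- def handle_submit(name_list: list[dict], name: str, number: str):
--     obj = {"name": name, "number": number}
--
--     def upsert(rest):
--         if not rest: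
--             return [obj]
--         if rest[0]["name"] == name:
--             return [obj] + rest[1:]
--         return [rest[0]] + upsert(rest[1:])
--
--     name_list[:] = upsert(name_list)
--     return name_list, "", ""
-- ===== Notes on version B (the rewrite author's own statement) =====
-- stated objective: alternative
-- what changed: A's three staged passes (project all names, 'in' membership test, then '.index' and an indexed assignment) are replaced by a pure structural recursion that rebuilds the list, substituting the new dict at the first matching head or appending it at the end of the recursion; no indices, no membership pass.
import Mathlib
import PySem

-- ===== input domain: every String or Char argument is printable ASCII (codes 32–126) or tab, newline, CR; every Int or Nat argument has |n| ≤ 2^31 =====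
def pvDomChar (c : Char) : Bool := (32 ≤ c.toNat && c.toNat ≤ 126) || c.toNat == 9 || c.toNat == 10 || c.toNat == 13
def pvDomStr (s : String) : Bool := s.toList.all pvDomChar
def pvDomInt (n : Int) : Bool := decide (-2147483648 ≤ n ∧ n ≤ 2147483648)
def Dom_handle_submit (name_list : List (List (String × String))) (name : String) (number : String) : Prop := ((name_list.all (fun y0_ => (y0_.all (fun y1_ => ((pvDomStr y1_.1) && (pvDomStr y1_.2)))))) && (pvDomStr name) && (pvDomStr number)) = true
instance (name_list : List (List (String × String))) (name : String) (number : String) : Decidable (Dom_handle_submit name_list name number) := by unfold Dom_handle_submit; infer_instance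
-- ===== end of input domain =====

-- B replaces A's three staged passes (name projection, `in` test, `.index` + indexed assignment)
-- by a structural recursion rebuilding the list (alternative decomposition, same cost); both
-- mutate name_list in place, the claim proved here is about the returned value only.

-- ===== PORT A =====
-- d["name"] is a first-match assoc lookup; under Pre_ it is always some, `.getD ""` is never consulted.
def handle_submit (name_list : List (List (String × String))) (name : String) (number : String) : (List (List (String × String))) × String × String :=
  let names := name_list.map (fun d => (d.lookup "name").getD "")
  if ¬ (name ∈ names) then
    let name_object : List (String × String) := [("name", name), ("number", number)]
    (name_list ++ [name_object], "", "")
  else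
    -- names.index(name): present in this branch, so index? is some; `.getD 0` never consulted
    let index := (PySem.List.index? names name).getD 0
    let name_object : List (String × String) := [("name", name), ("number", number)]
    (name_list.set index name_object, "", "")

-- ===== PORT B =====
-- B's recursive upsert: base case appends obj, a matching head is replaced by obj with the
-- untouched tail, otherwise head is kept and the recursion continues on the tail.
def pvUpsert (name : String) (obj : List (String × String)) : List (List (String × String)) → List (List (String × String))
  | [] => [obj]
  | d :: rest => if (d.lookup "name").getD "" == name then obj :: rest else d :: pvUpsert name obj rest

def handle_submit_alt (name_list : List (List (String × String))) (name : String) (number : String) : (List (List (String × String))) × String × String :=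
  (pvUpsert name [("name", name), ("number", number)] name_list, "", "")

-- ===== PRECONDITION & SPEC =====
-- Pre_ excludes exactly the inputs where Python A raises KeyError: some dict lacks the key "name".
def Pre_handle_submit (name_list : List (List (String × String))) (name : String) (number : String) : Prop :=
  (name_list.all (fun d => (d.lookup "name").isSome)) = true
instance (name_list : List (List (String × String))) (name : String) (number : String) : Decidable (Pre_handle_submit name_list name number) := by unfold Pre_handle_submit; infer_instance

def pvWitness_handle_submit : (List (List (String × String))) × String × String :=
  ([[("name", "bob"), ("number", "1")]], "alice", "2")

def Spec_handle_submit (name_list : List (List (String × String))) (name : String) (number : String) (out : (List (List (String × String))) × String × String) : Prop := out = handle_submit_alt name_list name number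
instance (name_list : List (List (String × String))) (name : String) (number : String) (out : (List (List (String × String))) × String × String) : Decidable (Spec_handle_submit name_list name number out) := by unfold Spec_handle_submit; infer_instance

-- ===== CLAIM (what is proved, stated in full; the proofs are below) =====
def Claim_equal_handle_submit : Prop := ∀ (name_list : List (List (String × String))) (name : String) (number : String), Dom_handle_submit name_list name number → Pre_handle_submit name_list name number → Spec_handle_submit name_list name number (handle_submit name_list name number)

-- ===== LEMMAS AND PROOFS =====

-- A's branch result (set-at-first-index or append) equals B's recursive upsert rebuild.
lemma upsert_core (name : String) (obj : List (String × String)) :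
    ∀ (xs : List (List (String × String))),
      (if name ∈ xs.map (fun d => (d.lookup "name").getD "") then
          xs.set ((PySem.List.index? (xs.map (fun d => (d.lookup "name").getD "")) name).getD 0) obj
        else xs ++ [obj]) = pvUpsert name obj xs := by
  intro xs
  induction xs with
  | nil => simp [pvUpsert]
  | cons d rest ih =>
    by_cases h : (d.lookup "name").getD "" = name
    · rw [List.map_cons, if_pos (by simp [h]), h, PySem.List.index?_cons_self]
      simp [pvUpsert, h]
    · rw [List.map_cons, PySem.List.index?_cons_of_ne _ h]
      by_cases hm : name ∈ rest.map (fun d => (d.lookup "name").getD "")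
      · obtain ⟨k, hk⟩ := Option.isSome_iff_exists.mp
          ((PySem.List.index?_isSome_iff (rest.map (fun d => (d.lookup "name").getD "")) name).mpr hm)
        rw [if_pos (List.mem_cons_of_mem _ hm), hk]
        have ihs := ih
        rw [if_pos hm, hk] at ihs
        simp only [Option.getD_some] at ihs
        simp [pvUpsert, h, Option.getD_some, List.set_cons_succ, ihs]
      · have hnot : ¬ name ∈ ((d.lookup "name").getD "") :: rest.map (fun d => (d.lookup "name").getD "") := by
          simp only [List.mem_cons]
          rintro (he | he)
          · exact h he.symm
          · exact hm he
        rw [if_neg hnot]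
        have ihs := ih
        rw [if_neg hm] at ihs
        simp [pvUpsert, h, ihs]

-- ===== VERDICT (by name: the statement is the Claim_ definition above) =====
theorem handle_submit_spec : Claim_equal_handle_submit := by
  intro name_list name number _ _
  unfold Spec_handle_submit handle_submit handle_submit_alt
  simp only []
  rw [← upsert_core name [("name", name), ("number", number)] name_list]
  by_cases hm : name ∈ name_list.map (fun d => (d.lookup "name").getD "")
  · simp [hm]
  · simp [hm]
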